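-- pv_equiv track=rewrite | github.com/mehuljain2003/cpfree | cpfree.py | combine_names
-- ===== SOURCE A (Python) =====
-- blacklist = {"video", "video classes", "video class", "subject wise content", "video lectures", "video lecture"}
--
-- def longest_overlap(a, b):
--     max_overlap = ""
--     max_len = min(len(a), len(b))
--     for i in range(1, max_len + 1):
--         if a[-i:] == b[:i]:
--             max_overlap = a[-i:]
--     return max_overlap
--
-- def combine_names(names):
--     result = []
--     n = len(names)
--     for i in range(n):
--         current = names[i].strip()
--         if current.lower() in blacklist:
--             continue
--         if i < n - 1:
--             next_name = names[i + 1].strip()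
--             ovl = longest_overlap(current, next_name)
--             if ovl and ovl == current:
--                 continue
--             cleaned = current[:-len(ovl)].rstrip() if ovl else current
--             if cleaned:
--                 result.append(cleaned)
--         else:
--             result.append(current)
--     return " ".join(result)
-- ===== SOURCE B (Python) =====
-- blacklist = {"video", "video classes", "video class", "subject wise content", "video lectures", "video lecture"}
--
-- def _overlap_len(a, b):
--     # length of the longest suffix of a that is a prefix of b,
--     # via the KMP failure function of b + sentinel + a  (O(len(a)+len(b)))
--     if not a or not b:
--         return 0
--     t = b + "\x00" + a
--     pi = [0] * len(t)
--     k = 0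
--     for i in range(1, len(t)):
--         while k > 0 and t[i] != t[k]:
--             k = pi[k - 1]
--         if t[i] == t[k]:
--             k += 1
--         pi[i] = k
--     return k
--
-- def combine_names(names):
--     stripped = [s.strip() for s in names]
--     parts = []
--     for cur, nxt in zip(stripped, stripped[1:]):
--         if cur.lower() in blacklist:
--             continue
--         k = _overlap_len(cur, nxt)
--         if k == len(cur):
--             continue
--         cleaned = cur[:len(cur) - k].rstrip() if k else cur
--         if cleaned:
--             parts.append(cleaned)
--     if stripped:
--         last = stripped[-1]
--         if last.lower() not in blacklist:
--             parts.append(last)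
--     return " ".join(parts)
-- ===== Notes on version B (the rewrite author's own statement) =====
-- stated objective: alternative
-- what changed: The try-every-length overlap scan is replaced by the KMP failure function of next+'\x00'+current (longest border = longest suffix/prefix overlap), and the outer index loop becomes a pre-stripped zip over adjacent pairs.
import Mathlib
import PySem

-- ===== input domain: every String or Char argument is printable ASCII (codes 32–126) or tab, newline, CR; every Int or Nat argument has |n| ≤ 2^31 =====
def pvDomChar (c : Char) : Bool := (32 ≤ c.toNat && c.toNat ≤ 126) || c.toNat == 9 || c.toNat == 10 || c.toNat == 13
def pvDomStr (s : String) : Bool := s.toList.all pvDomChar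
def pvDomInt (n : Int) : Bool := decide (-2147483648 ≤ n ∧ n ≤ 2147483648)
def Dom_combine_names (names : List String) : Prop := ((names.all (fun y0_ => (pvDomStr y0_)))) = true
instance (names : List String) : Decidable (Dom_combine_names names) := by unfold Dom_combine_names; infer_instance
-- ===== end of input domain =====

-- B replaces A's try-every-length overlap scan by the KMP failure function of
-- next + '\x00' + current (longest border = longest suffix/prefix overlap) and restructures
-- the outer index loop as a pre-stripped zip over adjacent pairs (objective: alternative).


-- module-level constant shared by both Pythons
def pvBlacklist : PySem.Set String :=
  PySem.Set.ofList ["video", "video classes", "video class", "subject wise content", "video lectures", "video lecture"]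

-- ===== PORT A =====
def longest_overlap (a b : String) : String :=
  let maxLen : Int := min (PySem.Str.len a) (PySem.Str.len b)
  (PySem.List.pyRange 1 (maxLen + 1)).foldl
    (fun max_overlap i =>
      if PySem.Str.slice a (some (-i)) none = PySem.Str.slice b none (some i) then
        PySem.Str.slice a (some (-i)) none
      else max_overlap) ""

def combine_names (names : List String) : String :=
  let n : Int := PySem.List.len names
  let result := (PySem.List.pyRange 0 n).foldl
    (fun (result : List String) i =>
      let current := PySem.Str.strip (PySem.List.pyGetD names i "")
      if PySem.Set.contains pvBlacklist (PySem.Str.lower current) then result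
      else if i < n - 1 then
        let next_name := PySem.Str.strip (PySem.List.pyGetD names (i + 1) "")
        let ovl := longest_overlap current next_name
        if ovl ≠ "" ∧ ovl = current then result
        else
          let cleaned := if ovl ≠ "" then
              PySem.Str.rstrip (PySem.Str.slice current none (some (-(PySem.Str.len ovl))))
            else current
          if cleaned ≠ "" then result ++ [cleaned] else result
      else result ++ [current]) []
  PySem.Str.join " " result

-- ===== PORT B =====
-- the sentinel character '\x00' Source B puts between the two strings
def pvSep : Char := Char.ofNat 0

-- the inner 'while k > 0 and t[i] != t[k]: k = pi[k-1]' loop; fuel-guarded (fuel := k suffices,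
-- since each step strictly decreases k)
def kmpShrink (t : List Char) (pi : List Nat) (i : Nat) : Nat → Nat → Nat
  | 0, k => k
  | fuel + 1, k =>
    if 0 < k ∧ t[i]! ≠ t[k]! then kmpShrink t pi i fuel (pi[k - 1]!) else k

-- _overlap_len of Source B: final value of k after the KMP failure-function pass over b ++ '\x00' ++ a
def overlapLen (a b : List Char) : Nat :=
  if a.isEmpty || b.isEmpty then 0
  else
    let t := b ++ pvSep :: a
    let st := (List.range' 1 (t.length - 1)).foldl
      (fun (st : List Nat × Nat) i =>
        let k1 := kmpShrink t st.1 i st.2 st.2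
        let k2 := if t[i]! = t[k1]! then k1 + 1 else k1
        (st.1.set i k2, k2)) (List.replicate t.length 0, 0)
    st.2

def combine_names_alt (names : List String) : String :=
  let stripped := names.map (fun s => PySem.Str.strip s)
  let parts := (stripped.zip stripped.tail).foldl
    (fun (parts : List String) cn =>
      if PySem.Set.contains pvBlacklist (PySem.Str.lower cn.1) then parts
      else
        let k := overlapLen cn.1.toList cn.2.toList
        if k = cn.1.toList.length then parts
        else
          let cleaned := if k ≠ 0 then
              PySem.Str.rstrip (PySem.Str.slice cn.1 none (some (-(k : Int))))
            else cn.1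
          if cleaned ≠ "" then parts ++ [cleaned] else parts) []
  let parts := if stripped ≠ [] then
      let last := PySem.List.pyGetD stripped (-1) ""
      if ¬ PySem.Set.contains pvBlacklist (PySem.Str.lower last) then parts ++ [last] else parts
    else parts
  PySem.Str.join " " parts

-- ===== PRECONDITION & SPEC =====
def Spec_combine_names (names : List String) (out : String) : Prop := out = combine_names_alt names
instance (names : List String) (out : String) : Decidable (Spec_combine_names names out) := by unfold Spec_combine_names; infer_instance

-- ===== CLAIM (what is proved, stated in full; the proofs are below) =====
def Claim_equal_combine_names : Prop := ∀ (names : List String), Dom_combine_names names → Spec_combine_names names (combine_names names)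

-- ===== LEMMAS AND PROOFS =====

-- the longest proper border length of t
def maxB (t : List Char) : Nat :=
  Nat.findGreatest (fun k => t.take k = t.drop (t.length - k)) (t.length - 1)


def bord (p : List Char) (k : Nat) : Prop := k < p.length ∧ p.take k = p.drop (p.length - k)

theorem maxB_le {p : List Char} : maxB p ≤ p.length - 1 :=
  Nat.findGreatest_le (p.length - 1)

theorem maxB_lt {p : List Char} (h : p ≠ []) : maxB p < p.length := by
  have h1 : maxB p ≤ p.length - 1 := maxB_le
  have hp := List.length_pos_of_ne_nil h
  omega

theorem maxB_bord {p : List Char} (h : p ≠ []) : bord p (maxB p) := by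
  refine ⟨maxB_lt h, ?_⟩
  rcases Nat.eq_zero_or_pos (maxB p) with h0 | h0
  · rw [h0]; simp
  · have := (Nat.findGreatest_eq_iff (m := maxB p)
      (P := fun k => p.take k = p.drop (p.length - k)) (k := p.length - 1)).mp rfl
    exact this.2.1 (by omega)

theorem bord_le_maxB {p : List Char} {k : Nat} (h : bord p k) : k ≤ maxB p := by
  have h1 := h.1
  exact Nat.le_findGreatest (by omega) h.2

theorem bord_take {p : List Char} {j k : Nat} (hj : bord p j) (hk : bord p k) (hjk : j < k) :
    bord (p.take k) j := by
  obtain ⟨hkl, hkq⟩ := hk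
  obtain ⟨hjl, hjq⟩ := hj
  refine ⟨by simp [List.length_take]; omega, ?_⟩
  have h1 : (p.take k).take j = p.take j := by rw [List.take_take]; congr 1; omega
  have h2 : (p.take k).length = k := by simp; omega
  rw [h1, h2, hkq, List.drop_drop]
  rw [hjq]
  congr 1; omega

theorem bord_of_take {p : List Char} {j k : Nat} (hk : bord p k) (hj : bord (p.take k) j) :
    bord p j := by
  obtain ⟨hkl, hkq⟩ := hk
  obtain ⟨hjl, hjq⟩ := hj
  have h2 : (p.take k).length = k := by simp; omega
  rw [h2] at hjl hjq
  refine ⟨by omega, ?_⟩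
  have h1 : p.take j = (p.take k).take j := by rw [List.take_take]; congr 1; omega
  rw [h1, hjq, hkq, List.drop_drop]
  congr 1; omega

theorem getBang_eq {t : List Char} {i : Nat} (hi : i < t.length) : t[i]! = t[i]'hi := by
  rw [List.getElem!_eq_getElem?_getD, List.getElem?_eq_getElem hi]; rfl

theorem take_succ_get {t : List Char} {i : Nat} (hi : i < t.length) :
    t.take (i+1) = t.take i ++ [t[i]'hi] := by
  rw [List.take_succ, List.getElem?_eq_getElem hi]; rfl

theorem bord_ext {t : List Char} {i k : Nat} (hi : i < t.length) (hk : k < i) :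
    bord (t.take (i+1)) (k+1) ↔ (bord (t.take i) k ∧ t[i]! = t[k]!) := by
  have hkt : k < t.length := lt_trans hk hi
  have hlen1 : (t.take (i+1)).length = i+1 := by simp; omega
  have hleni : (t.take i).length = i := by simp; omega
  rw [getBang_eq hi, getBang_eq hkt]
  constructor
  · rintro ⟨-, hq⟩
    rw [hlen1] at hq
    have e1 : (t.take (i+1)).take (k+1) = t.take k ++ [t[k]'hkt] := by
      rw [List.take_take, min_eq_left (by omega), take_succ_get hkt]
    have e2 : (t.take (i+1)).drop (i+1-(k+1)) = (t.take i).drop (i-k) ++ [t[i]'hi] := by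
      rw [take_succ_get hi, List.drop_append_of_le_length (by omega)]
      congr 2
      omega
    rw [e1, e2] at hq
    obtain ⟨h1, h2⟩ := List.append_inj' hq (by simp)
    refine ⟨⟨by omega, ?_⟩, by simpa using h2.symm⟩
    rw [List.take_take, min_eq_left (by omega), hleni]
    exact h1
  · rintro ⟨⟨-, hq⟩, he⟩
    rw [hleni] at hq
    rw [List.take_take, min_eq_left (by omega)] at hq
    refine ⟨by omega, ?_⟩
    rw [hlen1]
    have e1 : (t.take (i+1)).take (k+1) = t.take k ++ [t[k]'hkt] := by
      rw [List.take_take, min_eq_left (by omega), take_succ_get hkt]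
    have e2 : (t.take (i+1)).drop (i+1-(k+1)) = (t.take i).drop (i-k) ++ [t[i]'hi] := by
      rw [take_succ_get hi, List.drop_append_of_le_length (by omega)]
      congr 2
      omega
    rw [e1, e2, hq, he]


theorem kmpShrink_spec {t : List Char} {pi : List Nat} {i : Nat}
    (hil : i < t.length)
    (hpi : ∀ x, x < i → pi[x]! = maxB (t.take (x+1))) :
    ∀ fuel k0, k0 ≤ fuel → bord (t.take i) k0 →
      (∀ c, bord (t.take i) c → t[c]! = t[i]! → c ≤ k0) →
      bord (t.take i) (kmpShrink t pi i fuel k0) ∧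
      (kmpShrink t pi i fuel k0 = 0 ∨ t[kmpShrink t pi i fuel k0]! = t[i]!) ∧
      (∀ c, bord (t.take i) c → t[c]! = t[i]! → c ≤ kmpShrink t pi i fuel k0) := by
  intro fuel
  induction fuel with
  | zero =>
    intro k0 hk0 hb hmax
    have : k0 = 0 := by omega
    subst this
    exact ⟨hb, Or.inl rfl, hmax⟩
  | succ fuel ih =>
    intro k0 hk0 hb hmax
    by_cases hc : 0 < k0 ∧ t[i]! ≠ t[k0]!
    · rw [show kmpShrink t pi i (fuel+1) k0 = kmpShrink t pi i fuel (pi[k0-1]!) from by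
        rw [kmpShrink, if_pos hc]]
      obtain ⟨hpos, hne⟩ := hc
      have hleni : (t.take i).length = i := by simp; omega
      have hk0i : k0 < i := by have := hb.1; omega
      have hpk := hpi (k0 - 1) (by omega)
      have hsub : k0 - 1 + 1 = k0 := by omega
      rw [hsub] at hpk
      have htk0 : (t.take i).take k0 = t.take k0 := by
        rw [List.take_take, min_eq_left (by omega)]
      have hne' : t.take k0 ≠ [] := by
        intro h
        have h9 : (t.take k0).length = 0 := by rw [h]; rfl
        rw [List.length_take] at h9
        omega
      have hMb : bord ((t.take i).take k0) (pi[k0-1]!) := by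
        rw [htk0, hpk]; exact maxB_bord hne'
      have hb1 : bord (t.take i) (pi[k0-1]!) := bord_of_take hb hMb
      have hk1lt : pi[k0-1]! < k0 := by
        rw [hpk]
        have h1 : maxB (t.take k0) ≤ (t.take k0).length - 1 := maxB_le
        rw [List.length_take, min_eq_left (by omega)] at h1
        omega
      refine ih (pi[k0-1]!) (by omega) hb1 ?_
      intro c hbc hmc
      have hck0 : c ≤ k0 := hmax c hbc hmc
      have hcne : c ≠ k0 := by
        intro h; subst h; exact hne hmc.symm
      have h5 := bord_take hbc hb (by omega)
      rw [htk0] at h5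
      rw [hpk]
      exact bord_le_maxB h5
    · rw [show kmpShrink t pi i (fuel+1) k0 = k0 from by simp only [kmpShrink, hc, if_false]]
      refine ⟨hb, ?_, hmax⟩
      push_neg at hc
      by_cases h0 : k0 = 0
      · exact Or.inl h0
      · exact Or.inr ((hc (by omega)).symm)

theorem kmpStep_maxB {t : List Char} {pi : List Nat} {i : Nat}
    (hi1 : 1 ≤ i) (hil : i < t.length)
    (hpi : ∀ x, x < i → pi[x]! = maxB (t.take (x+1))) :
    (if t[i]! = t[kmpShrink t pi i (maxB (t.take i)) (maxB (t.take i))]! then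
        kmpShrink t pi i (maxB (t.take i)) (maxB (t.take i)) + 1
      else kmpShrink t pi i (maxB (t.take i)) (maxB (t.take i))) = maxB (t.take (i+1)) := by
  have hleni : (t.take i).length = i := by rw [List.length_take]; omega
  have htni : t.take i ≠ [] := by
    intro h; rw [h] at hleni; simp at hleni; omega
  have htni1 : t.take (i+1) ≠ [] := by
    intro h
    have h9 : (t.take (i+1)).length = 0 := by rw [h]; rfl
    rw [List.length_take] at h9; omega
  obtain ⟨hbk1, hok1, hmax1⟩ := kmpShrink_spec hil hpi (maxB (t.take i)) (maxB (t.take i))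
    le_rfl (maxB_bord htni) (fun c hc _ => bord_le_maxB hc)
  set k1 := kmpShrink t pi i (maxB (t.take i)) (maxB (t.take i)) with hk1def
  have hk1i : k1 < i := by have := hbk1.1; omega
  by_cases heq : t[i]! = t[k1]!
  · rw [if_pos heq]
    have hup : k1 + 1 ≤ maxB (t.take (i+1)) :=
      bord_le_maxB ((bord_ext hil hk1i).mpr ⟨hbk1, heq⟩)
    have hdown : maxB (t.take (i+1)) ≤ k1 + 1 := by
      rcases Nat.eq_zero_or_pos (maxB (t.take (i+1))) with h0 | h0
      · omega
      · obtain ⟨e, he⟩ := Nat.exists_eq_succ_of_ne_zero (by omega : maxB (t.take (i+1)) ≠ 0)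
        have hbg := maxB_bord htni1
        rw [he] at hbg
        have hei : e < i := by
          have := hbg.1
          rw [List.length_take] at this
          omega
        obtain ⟨hbe, hme⟩ := (bord_ext hil hei).mp hbg
        have := hmax1 e hbe hme.symm
        omega
    omega
  · rw [if_neg heq]
    have hk10 : k1 = 0 := by
      rcases hok1 with h | h
      · exact h
      · exact absurd h.symm heq
    rcases Nat.eq_zero_or_pos (maxB (t.take (i+1))) with h0 | h0
    · omega
    · exfalso
      obtain ⟨e, he⟩ := Nat.exists_eq_succ_of_ne_zero (by omega : maxB (t.take (i+1)) ≠ 0)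
      have hbg := maxB_bord htni1
      rw [he] at hbg
      have hei : e < i := by
        have := hbg.1
        rw [List.length_take] at this
        omega
      obtain ⟨hbe, hme⟩ := (bord_ext hil hei).mp hbg
      have he0 : e = 0 := by have := hmax1 e hbe hme.symm; omega
      rw [he0] at hme
      rw [hk10] at heq
      exact heq hme


def kmpF (t : List Char) (st : List Nat × Nat) (i : Nat) : List Nat × Nat :=
  let k1 := kmpShrink t st.1 i st.2 st.2
  let k2 := if t[i]! = t[k1]! then k1 + 1 else k1
  (st.1.set i k2, k2)

theorem kmp_inv (t : List Char) (ht : 1 ≤ t.length) :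
    ∀ j, j + 1 ≤ t.length →
      ((List.range' 1 j).foldl (kmpF t) (List.replicate t.length 0, 0)).1.length = t.length ∧
      ((List.range' 1 j).foldl (kmpF t) (List.replicate t.length 0, 0)).2 = maxB (t.take (j+1)) ∧
      (∀ x, x ≤ j →
        ((List.range' 1 j).foldl (kmpF t) (List.replicate t.length 0, 0)).1[x]! = maxB (t.take (x+1))) := by
  intro j
  induction j with
  | zero =>
    intro _
    have h1 : maxB (t.take 1) ≤ (t.take 1).length - 1 := maxB_le
    rw [List.length_take] at h1
    have hm0 : maxB (t.take 1) = 0 := by omega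
    refine ⟨by simp, ?_, ?_⟩
    · simpa using hm0.symm
    · intro x hx
      have hx0 : x = 0 := by omega
      subst hx0
      have h2 : (List.replicate t.length (0:Nat))[0]! = 0 := by
        rw [List.getElem!_eq_getElem?_getD, List.getElem?_replicate,
          if_pos (show 0 < t.length by omega)]
        rfl
      simpa [h2] using hm0.symm
  | succ j ih =>
    intro hj1
    obtain ⟨hlen, hk, hpis⟩ := ih (by omega)
    rw [List.range'_1_concat, List.foldl_append, List.foldl_cons, List.foldl_nil]
    set st := (List.range' 1 j).foldl (kmpF t) (List.replicate t.length 0, 0) with hst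
    have hi : 1 + j < t.length := by omega
    have hpi' : ∀ x, x < 1 + j → st.1[x]! = maxB (t.take (x+1)) := by
      intro x hx
      exact hpis x (by omega)
    have hstep := kmpStep_maxB (t := t) (pi := st.1) (i := 1 + j) (by omega) hi hpi'
    have hkeq : st.2 = maxB (t.take (1+j)) := by
      rw [hk, Nat.add_comm j 1]
    constructor
    · simp [kmpF, List.length_set, hlen]
    constructor
    · simp only [kmpF]
      rw [hkeq, hstep, Nat.add_comm 1 j]
    · intro x hx
      simp only [kmpF]
      rw [hkeq, hstep]
      by_cases hxi : x = 1 + j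
      · subst hxi
        rw [List.getElem!_eq_getElem?_getD, List.getElem?_set, if_pos rfl, hlen, if_pos hi]
        rfl
      · rw [List.getElem!_eq_getElem?_getD, List.getElem?_set_ne (by omega),
          ← List.getElem!_eq_getElem?_getD, hpis x (by omega)]

def ovK (a b : List Char) : Nat :=
  Nat.findGreatest (fun k => a.drop (a.length - k) = b.take k) (min a.length b.length)

theorem sep_take {a b : List Char} {k : Nat} (hk : k ≤ b.length) :
    (b ++ pvSep :: a).take k = b.take k :=
  List.take_append_of_le_length hk

theorem sep_drop {a b : List Char} {k : Nat} (hk : k ≤ a.length) :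
    (b ++ pvSep :: a).drop ((b ++ pvSep :: a).length - k) = a.drop (a.length - k) := by
  have hlt : (b ++ pvSep :: a).length = b.length + (1 + a.length) := by simp; omega
  rw [hlt, List.drop_append, List.drop_eq_nil_of_le (by omega), show
    b.length + (1 + a.length) - k - b.length = 1 + (a.length - k) from by omega]
  rw [show (1 + (a.length - k)) = (a.length - k) + 1 from by omega]
  simp [List.drop_succ_cons]

theorem maxB_sep (a b : List Char) (hsa : pvSep ∉ a) (hsb : pvSep ∉ b) :
    maxB (b ++ pvSep :: a) = ovK a b := by
  set t := b ++ pvSep :: a with hT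
  have hlt : t.length = b.length + 1 + a.length := by simp [hT]; omega
  have htne : t ≠ [] := by
    intro h; rw [h] at hlt; simp at hlt; omega
  have hQiff : ∀ k, k ≤ min a.length b.length →
      ((t.take k = t.drop (t.length - k)) ↔ (a.drop (a.length - k) = b.take k)) := by
    intro k hk
    rw [sep_take (by omega), sep_drop (by omega)]
    exact eq_comm
  have hsep : ∀ (h : b.length < t.length), t[b.length]'h = pvSep := by
    intro h
    have h9 := List.getElem_append_right (as := b) (bs := pvSep :: a) (i := b.length)
      le_rfl (h₂ := by simp)
    simp only [Nat.sub_self, List.getElem_cons_zero] at h9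
    exact h9
  have hnotsep : ∀ (j : Nat) (hj : j < t.length), j ≠ b.length → t[j]'hj ≠ pvSep := by
    intro j hj hne
    by_cases hlb : j < b.length
    · have h9 : t[j]'hj = b[j]'hlb := List.getElem_append_left hlb
      rw [h9]
      intro hc
      exact hsb (hc ▸ List.getElem_mem hlb)
    · have hle : b.length ≤ j := by omega
      have h9 : t[j]'hj = (pvSep :: a)[j - b.length]'(by simp [hT] at hj ⊢; omega) :=
        List.getElem_append_right hle
      obtain ⟨m, hm⟩ : ∃ m, j - b.length = m + 1 := ⟨j - b.length - 1, by omega⟩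
      rw [h9]
      have h10 : (pvSep :: a)[j - b.length]'(by simp [hT] at hj ⊢; omega)
          = a[m]'(by simp [hT] at hj; omega) := by
        simp only [hm, List.getElem_cons_succ]
      rw [h10]
      intro hc
      exact hsa (hc ▸ List.getElem_mem _)
  have hQfail : ∀ k, min a.length b.length < k → k ≤ t.length - 1 →
      t.take k ≠ t.drop (t.length - k) := by
    intro k hmin hk1 h
    have hkt : k ≤ t.length := by omega
    have hlen1 : (t.take k).length = k := by rw [List.length_take]; omega
    have hlen2 : (t.drop (t.length - k)).length = k := by rw [List.length_drop]; omega
    by_cases hkb : b.length < k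
    · -- the prefix contains the sentinel at position b.length; the suffix there lies in a
      have hm1 : b.length < (t.take k).length := by omega
      have hm2 : b.length < (t.drop (t.length - k)).length := by omega
      have hgh : (t.take k)[b.length]? = (t.drop (t.length - k))[b.length]? := by rw [h]
      rw [List.getElem?_eq_getElem hm1, List.getElem?_eq_getElem hm2] at hgh
      have hgh' := Option.some.inj hgh
      rw [List.getElem_take, List.getElem_drop] at hgh'
      have e1 : t[b.length]'(by omega) = pvSep := hsep _
      have e2 : t[t.length - k + b.length]'(by omega) ≠ pvSep :=
        hnotsep _ (by omega) (by omega)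
      rw [e1] at hgh'
      exact e2 hgh'.symm
    · -- k ≤ b.length, hence a.length < k: the suffix contains the sentinel there
      have hka : a.length < k := by omega
      have hm1 : k - 1 - a.length < (t.take k).length := by omega
      have hm2 : k - 1 - a.length < (t.drop (t.length - k)).length := by omega
      have hgh : (t.take k)[k - 1 - a.length]? = (t.drop (t.length - k))[k - 1 - a.length]? := by
        rw [h]
      rw [List.getElem?_eq_getElem hm1, List.getElem?_eq_getElem hm2] at hgh
      have hgh' := Option.some.inj hgh
      rw [List.getElem_take, List.getElem_drop] at hgh'
      have hidx : t.length - k + (k - 1 - a.length) = b.length := by omega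
      have e2 : t[t.length - k + (k - 1 - a.length)]'(by omega) = pvSep := by
        simp only [hidx]
        exact hsep (by omega)
      have e1 : t[k - 1 - a.length]'(by omega) ≠ pvSep :=
        hnotsep _ (by omega) (by omega)
      rw [e2] at hgh'
      exact e1 hgh'
  have hminle : min a.length b.length ≤ t.length - 1 := by omega
  apply Nat.le_antisymm
  · rcases Nat.eq_zero_or_pos (maxB t) with h0 | h0
    · omega
    · have hb := maxB_bord htne
      have hle : maxB t ≤ t.length - 1 := maxB_le
      have hmin : maxB t ≤ min a.length b.length := by
        by_contra hgt
        exact hQfail (maxB t) (by omega) hle hb.2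
      exact Nat.le_findGreatest hmin ((hQiff (maxB t) hmin).mp hb.2)
  · rcases Nat.eq_zero_or_pos (ovK a b) with h0 | h0
    · omega
    · have hKle : ovK a b ≤ min a.length b.length := Nat.findGreatest_le _
      have hPK := (Nat.findGreatest_eq_iff (m := ovK a b)
        (P := fun k => a.drop (a.length - k) = b.take k)
        (k := min a.length b.length)).mp rfl
      have hQK : t.take (ovK a b) = t.drop (t.length - ovK a b) :=
        (hQiff (ovK a b) hKle).mpr (hPK.2.1 (by omega))
      exact Nat.le_findGreatest (by omega) hQK


theorem overlapLen_eq_maxB (a b : List Char) (ha : a ≠ []) (hb : b ≠ []) :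
    overlapLen a b = maxB (b ++ pvSep :: a) := by
  unfold overlapLen
  have hE : (a.isEmpty || b.isEmpty) = false := by
    simp [ha, hb]
  rw [hE]
  simp only [Bool.false_eq_true, if_false]
  have hlen : 1 ≤ (b ++ pvSep :: a).length := by
    simp only [List.length_append, List.length_cons]; omega
  have h := (kmp_inv (b ++ pvSep :: a) hlen ((b ++ pvSep :: a).length - 1) (by omega)).2.1
  rw [show (b ++ pvSep :: a).length - 1 + 1 = (b ++ pvSep :: a).length from by omega,
    List.take_length] at h
  exact h

theorem overlapLen_eq_ovK (a b : List Char) (hsa : pvSep ∉ a) (hsb : pvSep ∉ b) :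
    overlapLen a b = ovK a b := by
  by_cases ha : a = []
  · subst ha
    have h1 : overlapLen [] b = 0 := by unfold overlapLen; simp
    have h2 : ovK [] b = 0 := by
      unfold ovK
      have : min ([] : List Char).length b.length = 0 := by simp
      rw [this, Nat.findGreatest_zero]
    rw [h1, h2]
  · by_cases hb : b = []
    · subst hb
      have h1 : overlapLen a [] = 0 := by unfold overlapLen; simp
      have h2 : ovK a [] = 0 := by
        unfold ovK
        have : min a.length ([] : List Char).length = 0 := by simp
        rw [this, Nat.findGreatest_zero]
      rw [h1, h2]
    · rw [overlapLen_eq_maxB a b ha hb, maxB_sep a b hsa hsb]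

theorem lo_fold (a b : String) : ∀ m : Nat, m ≤ min a.toList.length b.toList.length →
    ((PySem.List.pyRange 1 ((m : Int) + 1)).foldl
      (fun max_overlap i =>
        if PySem.Str.slice a (some (-i)) none = PySem.Str.slice b none (some i) then
          PySem.Str.slice a (some (-i)) none
        else max_overlap) "").toList
    = a.toList.drop (a.toList.length - Nat.findGreatest
        (fun k => a.toList.drop (a.toList.length - k) = b.toList.take k) m) := by
  intro m
  induction m with
  | zero =>
    intro _
    rw [show ((0 : Nat) : Int) + 1 = 1 from by norm_num,
      show PySem.List.pyRange 1 1 = [] from by decide]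
    simp
  | succ m ih =>
    intro hm
    rw [show (((m + 1 : Nat)) : Int) + 1 = ((m : Int) + 1) + 1 from by push_cast; ring,
      PySem.List.pyRange_one_succ_right (by omega), List.foldl_append, List.foldl_cons,
      List.foldl_nil]
    have hcast : ((m : Int) + 1) = (((m + 1 : Nat)) : Int) := by push_cast; ring
    rw [hcast]
    have hsliceA : (PySem.Str.slice a (some (-((m + 1 : Nat) : Int))) none).toList
        = a.toList.drop (a.toList.length - (m + 1)) := by
      rw [PySem.Str.toList_slice, PySem.Chars.slice_eq_listSlice,
        PySem.List.slice_from_neg_natCast _ _ (by omega)]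
    have hsliceB : (PySem.Str.slice b none (some ((m + 1 : Nat) : Int))).toList
        = b.toList.take (m + 1) := by
      rw [PySem.Str.toList_slice, PySem.Chars.slice_eq_listSlice, PySem.List.slice_to_natCast]
    rw [Nat.findGreatest_succ]
    by_cases hP : a.toList.drop (a.toList.length - (m + 1)) = b.toList.take (m + 1)
    · rw [if_pos (String.toList_inj.mp (hsliceA.trans (hP.trans hsliceB.symm))), if_pos hP]
      rw [hsliceA]
    · rw [if_neg (fun hc => hP ((hsliceA.symm.trans (congrArg String.toList hc)).trans hsliceB)),
        if_neg hP]
      exact ih (by omega)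

theorem longest_overlap_toList (a b : String) :
    (longest_overlap a b).toList
      = a.toList.drop (a.toList.length - ovK a.toList b.toList) := by
  show ((PySem.List.pyRange 1 (min (PySem.Str.len a) (PySem.Str.len b) + 1)).foldl
      (fun max_overlap i =>
        if PySem.Str.slice a (some (-i)) none = PySem.Str.slice b none (some i) then
          PySem.Str.slice a (some (-i)) none
        else max_overlap) "").toList = _
  have hmin : min (PySem.Str.len a) (PySem.Str.len b)
      = ((min a.toList.length b.toList.length : Nat) : Int) := by
    simp [PySem.Str.len]
  rw [hmin]
  exact lo_fold a b _ le_rfl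

-- what one middle (non-last) element contributes to the result, phrased B-side
def pairOut (c x : String) : List String :=
  if PySem.Set.contains pvBlacklist (PySem.Str.lower c) then []
  else if overlapLen c.toList x.toList = c.toList.length then []
  else if (if overlapLen c.toList x.toList ≠ 0 then
        PySem.Str.rstrip (PySem.Str.slice c none (some (-((overlapLen c.toList x.toList : Nat) : Int))))
      else c) ≠ "" then
    [(if overlapLen c.toList x.toList ≠ 0 then
        PySem.Str.rstrip (PySem.Str.slice c none (some (-((overlapLen c.toList x.toList : Nat) : Int))))
      else c)]
  else []

-- the same contribution, phrased A-side
def pairA (c x : String) : List String :=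
  if PySem.Set.contains pvBlacklist (PySem.Str.lower c) then []
  else if longest_overlap c x ≠ "" ∧ longest_overlap c x = c then []
  else if (if longest_overlap c x ≠ "" then
        PySem.Str.rstrip (PySem.Str.slice c none (some (-(PySem.Str.len (longest_overlap c x)))))
      else c) ≠ "" then
    [(if longest_overlap c x ≠ "" then
        PySem.Str.rstrip (PySem.Str.slice c none (some (-(PySem.Str.len (longest_overlap c x)))))
      else c)]
  else []

-- what the last element contributes
def lastOut (c : String) : List String :=
  if PySem.Set.contains pvBlacklist (PySem.Str.lower c) then [] else [c]

theorem pairA_eq_pairOut (c x : String) (hc : pvSep ∉ c.toList) (hx : pvSep ∉ x.toList) :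
    pairA c x = pairOut c x := by
  unfold pairA pairOut
  by_cases hbl : PySem.Set.contains pvBlacklist (PySem.Str.lower c) = true
  · rw [if_pos hbl, if_pos hbl]
  · rw [if_neg hbl, if_neg hbl]
    have hOL : overlapLen c.toList x.toList = ovK c.toList x.toList :=
      overlapLen_eq_ovK _ _ hc hx
    have hlo := longest_overlap_toList c x
    have hKle : ovK c.toList x.toList ≤ c.toList.length :=
      le_trans (Nat.findGreatest_le _) (min_le_left _ _)
    have hlolen : (longest_overlap c x).toList.length
        = ovK c.toList x.toList := by
      rw [hlo, List.length_drop]; omega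
    have hne_iff : (longest_overlap c x ≠ "") ↔ ovK c.toList x.toList ≠ 0 := by
      apply not_congr
      rw [← String.toList_eq_nil_iff, hlo, List.drop_eq_nil_iff]
      omega
    have heqc_iff : (longest_overlap c x = c) ↔ ovK c.toList x.toList = c.toList.length := by
      constructor
      · intro h
        have := congrArg (fun s => s.toList.length) h
        simp only at this
        rw [hlolen] at this
        exact this
      · intro h
        apply String.toList_inj.mp
        rw [hlo, h, Nat.sub_self, List.drop_zero]
    have hlen : PySem.Str.len (longest_overlap c x) = ((ovK c.toList x.toList : Nat) : Int) := by
      rw [PySem.Str.len, hlolen]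
    rw [hOL]
    simp only [hne_iff, heqc_iff, hlen]
    by_cases hK : ovK c.toList x.toList = c.toList.length
    · by_cases hK0 : ovK c.toList x.toList = 0
      · have hc0 : c = "" := by
          rw [← String.toList_eq_nil_iff, List.eq_nil_iff_length_eq_zero]; omega
        rw [if_pos hK, if_neg (by rintro ⟨h1, -⟩; exact h1 hK0)]
        rw [if_neg (show ¬ ovK c.toList x.toList ≠ 0 from fun h => h hK0)]
        rw [if_neg (show ¬ c ≠ "" from fun h => h hc0)]
      · rw [if_pos hK, if_pos ⟨hK0, hK⟩]
    · rw [if_neg hK, if_neg (by rintro ⟨-, h2⟩; exact hK h2)]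

theorem strip_no_sep (s : String) (hd : pvDomStr s = true) :
    pvSep ∉ (PySem.Str.strip s).toList := by
  intro hmem
  rw [PySem.Str.toList_strip] at hmem
  unfold PySem.Chars.strip PySem.Chars.rstrip PySem.Chars.lstrip at hmem
  rw [List.mem_reverse] at hmem
  have h1 := (List.dropWhile_sublist _).subset hmem
  rw [List.mem_reverse] at h1
  have h2 := (List.dropWhile_sublist _).subset h1
  unfold pvDomStr at hd
  have h3 := List.all_eq_true.mp hd _ h2
  have h4 : pvDomChar pvSep = false := by decide
  rw [h4] at h3
  exact Bool.false_ne_true h3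

theorem getD_map_strip (names : List String) (i : Nat) (hi : i < names.length) :
    (names.map (fun s => PySem.Str.strip s)).getD i ""
      = PySem.Str.strip (names.getD i "") := by
  rw [List.getD_eq_getElem _ _ (by rw [List.length_map]; exact hi),
    List.getD_eq_getElem _ _ hi, List.getElem_map]

theorem flatMap_range_zip {β : Type} (f : String → String → List β) :
    ∀ (l : List String),
      (List.range (l.length - 1)).flatMap
          (fun i => f (l.getD i "") (l.getD (i + 1) ""))
        = (l.zip l.tail).flatMap (fun p => f p.1 p.2) := by
  intro l
  induction l with
  | nil => simp
  | cons x xs ih =>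
    cases xs with
    | nil => simp
    | cons y rest =>
      have hlen : (x :: y :: rest).length - 1 = rest.length + 1 := by simp
      rw [hlen, List.range_succ_eq_map, List.flatMap_cons, List.flatMap_map]
      have hmid : (List.range rest.length).flatMap
            (fun i => f ((x :: y :: rest).getD (i.succ) "") ((x :: y :: rest).getD (i.succ + 1) ""))
          = (List.range rest.length).flatMap
            (fun i => f ((y :: rest).getD i "") ((y :: rest).getD (i + 1) "")) := by
        rw [List.flatMap_def, List.flatMap_def]
        congr 1
      rw [hmid]
      have hlen2 : rest.length = (y :: rest).length - 1 := by simp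
      rw [hlen2, ih]
      simp

theorem combineB_parts (names : List String) (h : names ≠ []) :
    combine_names_alt names = PySem.Str.join " "
      ((((names.map (fun s => PySem.Str.strip s)).zip
            (names.map (fun s => PySem.Str.strip s)).tail).flatMap
          (fun cn => pairOut cn.1 cn.2))
        ++ lastOut ((names.map (fun s => PySem.Str.strip s)).getD (names.length - 1) "")) := by
  simp only [combine_names_alt]
  set st := names.map (fun s => PySem.Str.strip s) with hst
  have hstne : st ≠ [] := by simp [hst, h]
  have hstlen : st.length = names.length := by simp [hst]
  rw [if_pos hstne]
  have hbody : (fun (parts : List String) (cn : String × String) =>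
      if PySem.Set.contains pvBlacklist (PySem.Str.lower cn.1) = true then parts
      else
        if overlapLen cn.1.toList cn.2.toList = cn.1.toList.length then parts
        else
          if (if overlapLen cn.1.toList cn.2.toList ≠ 0 then
                PySem.Str.rstrip (PySem.Str.slice cn.1 none
                  (some (-(overlapLen cn.1.toList cn.2.toList : Int))))
              else cn.1) ≠ "" then
            parts ++ [if overlapLen cn.1.toList cn.2.toList ≠ 0 then
                PySem.Str.rstrip (PySem.Str.slice cn.1 none
                  (some (-(overlapLen cn.1.toList cn.2.toList : Int))))
              else cn.1]
          else parts)
      = (fun (parts : List String) (cn : String × String) => parts ++ pairOut cn.1 cn.2) := by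
    funext parts cn
    simp only [pairOut]
    by_cases c1 : PySem.Set.contains pvBlacklist (PySem.Str.lower cn.1) = true
    · rw [if_pos c1, if_pos c1, List.append_nil]
    · rw [if_neg c1, if_neg c1]
      by_cases c2 : overlapLen cn.1.toList cn.2.toList = cn.1.toList.length
      · rw [if_pos c2, if_pos c2, List.append_nil]
      · rw [if_neg c2, if_neg c2]
        by_cases c3 : (if overlapLen cn.1.toList cn.2.toList ≠ 0 then
              PySem.Str.rstrip (PySem.Str.slice cn.1 none
                (some (-(overlapLen cn.1.toList cn.2.toList : Int))))
            else cn.1) ≠ ""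
        · rw [if_pos c3, if_pos c3]
        · rw [if_neg c3, if_neg c3, List.append_nil]
  rw [hbody, PySem.List.foldl_append_eq_flatMap, List.nil_append]
  have hlast : PySem.List.pyGetD st (-1) "" = st.getD (names.length - 1) "" := by
    rw [PySem.List.pyGetD_neg_one st "" hstne, List.getLast_eq_getElem,
      List.getD_eq_getElem _ _ (by have := List.length_pos_of_ne_nil h; omega)]
    congr 1
    omega
  rw [hlast]
  by_cases hbl : PySem.Set.contains pvBlacklist
      (PySem.Str.lower (st.getD (names.length - 1) "")) = true
  · rw [if_neg (fun hc => hc hbl)]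
    simp only [lastOut, if_pos hbl, List.append_nil]
  · rw [if_pos hbl]
    simp only [lastOut, if_neg hbl]

theorem combineA_parts (names : List String) (h : names ≠ []) :
    combine_names names = PySem.Str.join " "
      ((((names.map (fun s => PySem.Str.strip s)).zip
            (names.map (fun s => PySem.Str.strip s)).tail).flatMap
          (fun cn => pairA cn.1 cn.2))
        ++ lastOut ((names.map (fun s => PySem.Str.strip s)).getD (names.length - 1) "")) := by
  simp only [combine_names]
  have hlen : PySem.List.len names = ((names.length : Nat) : Int) := by
    simp [PySem.List.len_eq]
  rw [hlen, PySem.List.pyRange_zero_natCast, List.foldl_map]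
  have hbody : (fun (x : List String) (y : Nat) =>
      if PySem.Set.contains pvBlacklist
          (PySem.Str.lower (PySem.Str.strip (PySem.List.pyGetD names ((y : Int)) ""))) = true then x
      else
        if (y : Int) < ((names.length : Nat) : Int) - 1 then
          if longest_overlap (PySem.Str.strip (PySem.List.pyGetD names ((y : Int)) ""))
                (PySem.Str.strip (PySem.List.pyGetD names ((y : Int) + 1) "")) ≠ "" ∧
              longest_overlap (PySem.Str.strip (PySem.List.pyGetD names ((y : Int)) ""))
                (PySem.Str.strip (PySem.List.pyGetD names ((y : Int) + 1) "")) =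
              PySem.Str.strip (PySem.List.pyGetD names ((y : Int)) "") then x
          else
            if (if longest_overlap (PySem.Str.strip (PySem.List.pyGetD names ((y : Int)) ""))
                    (PySem.Str.strip (PySem.List.pyGetD names ((y : Int) + 1) "")) ≠ "" then
                  PySem.Str.rstrip
                    (PySem.Str.slice (PySem.Str.strip (PySem.List.pyGetD names ((y : Int)) "")) none
                      (some (-PySem.Str.len
                        (longest_overlap (PySem.Str.strip (PySem.List.pyGetD names ((y : Int)) ""))
                          (PySem.Str.strip (PySem.List.pyGetD names ((y : Int) + 1) ""))))))
                else PySem.Str.strip (PySem.List.pyGetD names ((y : Int)) "")) ≠ "" then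
              x ++ [if longest_overlap (PySem.Str.strip (PySem.List.pyGetD names ((y : Int)) ""))
                    (PySem.Str.strip (PySem.List.pyGetD names ((y : Int) + 1) "")) ≠ "" then
                  PySem.Str.rstrip
                    (PySem.Str.slice (PySem.Str.strip (PySem.List.pyGetD names ((y : Int)) "")) none
                      (some (-PySem.Str.len
                        (longest_overlap (PySem.Str.strip (PySem.List.pyGetD names ((y : Int)) ""))
                          (PySem.Str.strip (PySem.List.pyGetD names ((y : Int) + 1) ""))))))
                else PySem.Str.strip (PySem.List.pyGetD names ((y : Int)) "")]
            else x
        else x ++ [PySem.Str.strip (PySem.List.pyGetD names ((y : Int)) "")])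
      = (fun (x : List String) (y : Nat) =>
        x ++ (if y < names.length - 1 then
            pairA (PySem.Str.strip (names.getD y ""))
                  (PySem.Str.strip (names.getD (y + 1) ""))
          else lastOut (PySem.Str.strip (names.getD y "")))) := by
    funext x y
    have hg1 : PySem.List.pyGetD names ((y : Int)) "" = names.getD y "" :=
      PySem.List.pyGetD_natCast ..
    have hg2 : PySem.List.pyGetD names ((y : Int) + 1) "" = names.getD (y + 1) "" := by
      rw [show ((y : Int) + 1) = ((y + 1 : Nat) : Int) from by push_cast; ring,
        PySem.List.pyGetD_natCast]
    rw [hg1, hg2]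
    by_cases hbl : PySem.Set.contains pvBlacklist
        (PySem.Str.lower (PySem.Str.strip (names.getD y ""))) = true
    · rw [if_pos hbl]
      simp only [pairA, lastOut, if_pos hbl]
      by_cases hy : y < names.length - 1
      · rw [if_pos hy, List.append_nil]
      · rw [if_neg hy, List.append_nil]
    · rw [if_neg hbl]
      by_cases hy : y < names.length - 1
      · rw [if_pos (show (y : Int) < ((names.length : Nat) : Int) - 1 by omega), if_pos hy]
        simp only [pairA, if_neg hbl]
        by_cases hg : longest_overlap (PySem.Str.strip (names.getD y ""))
              (PySem.Str.strip (names.getD (y + 1) "")) ≠ "" ∧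
            longest_overlap (PySem.Str.strip (names.getD y ""))
              (PySem.Str.strip (names.getD (y + 1) "")) = PySem.Str.strip (names.getD y "")
        · rw [if_pos hg, if_pos hg, List.append_nil]
        · rw [if_neg hg, if_neg hg]
          by_cases hcl : (if longest_overlap (PySem.Str.strip (names.getD y ""))
                  (PySem.Str.strip (names.getD (y + 1) "")) ≠ "" then
                PySem.Str.rstrip
                  (PySem.Str.slice (PySem.Str.strip (names.getD y "")) none
                    (some (-PySem.Str.len
                      (longest_overlap (PySem.Str.strip (names.getD y ""))
                        (PySem.Str.strip (names.getD (y + 1) ""))))))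
              else PySem.Str.strip (names.getD y "")) ≠ ""
          · rw [if_pos hcl, if_pos hcl]
          · rw [if_neg hcl, if_neg hcl, List.append_nil]
      · rw [if_neg (show ¬ ((y : Int) < ((names.length : Nat) : Int) - 1) by omega), if_neg hy]
        simp only [lastOut, if_neg hbl]
  rw [hbody, PySem.List.foldl_append_eq_flatMap, List.nil_append]
  obtain ⟨m, hm⟩ : ∃ m, names.length = m + 1 :=
    ⟨names.length - 1, by have := List.length_pos_of_ne_nil h; omega⟩
  rw [hm, List.range_succ, List.flatMap_append, List.flatMap_cons, List.flatMap_nil,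
    List.append_nil]
  simp only [Nat.add_sub_cancel]
  rw [if_neg (show ¬ (m < m) from by omega)]
  have hmid : (List.range m).flatMap
        (fun i => if i < m then
            pairA (PySem.Str.strip (names.getD i ""))
                  (PySem.Str.strip (names.getD (i + 1) ""))
          else lastOut (PySem.Str.strip (names.getD i "")))
      = (List.range ((names.map (fun s => PySem.Str.strip s)).length - 1)).flatMap
        (fun i => pairA ((names.map (fun s => PySem.Str.strip s)).getD i "")
                        ((names.map (fun s => PySem.Str.strip s)).getD (i + 1) "")) := by
    have hlen2 : (names.map (fun s => PySem.Str.strip s)).length - 1 = m := by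
      rw [List.length_map]; omega
    rw [hlen2, List.flatMap_def, List.flatMap_def]
    congr 1
    apply List.map_congr_left
    intro i hi
    rw [List.mem_range] at hi
    rw [if_pos hi, getD_map_strip names i (by omega), getD_map_strip names (i + 1) (by omega)]
  rw [hmid, flatMap_range_zip, getD_map_strip names m (by omega)]

theorem combine_names_nil : combine_names [] = "" := by decide

theorem combine_names_alt_nil : combine_names_alt [] = "" := by decide

-- ===== VERDICT (by name: the statement is the Claim_ definition above) =====
theorem combine_names_spec : Claim_equal_combine_names := by
  unfold Claim_equal_combine_names
  intro names hdom
  unfold Spec_combine_names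
  by_cases h : names = []
  · subst h
    rw [combine_names_nil, combine_names_alt_nil]
  · rw [combineA_parts names h, combineB_parts names h]
    congr 2
    rw [List.flatMap_def, List.flatMap_def]
    congr 1
    apply List.map_congr_left
    intro cn hcn
    obtain ⟨c1, c2⟩ := cn
    obtain ⟨h1, h2⟩ := List.of_mem_zip hcn
    have h2' := List.mem_of_mem_tail h2
    have hdom' : ∀ y ∈ names.map (fun s => PySem.Str.strip s), pvSep ∉ y.toList := by
      intro y hy
      obtain ⟨s, hs, rfl⟩ := List.mem_map.mp hy
      have := List.all_eq_true.mp hdom s hs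
      exact strip_no_sep s this
    exact pairA_eq_pairOut c1 c2 (hdom' _ h1) (hdom' _ h2')
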